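-- pv_equiv track=rewrite | github.com/uday-sherlock/webscraper | contenthound.py | blanklinerem
-- ===== SOURCE A (Python) =====
-- def blanklinerem(delimstripdata):
-- 	d = delimstripdata
-- 	b = ''
-- 	blankpresent = True
-- 	while(blankpresent):
-- 		try: idx = d.index(b)
-- 		except ValueError:
-- 			return d
-- 		else:
-- 			d.remove(b)
-- 	return d
-- ===== SOURCE B (Python) =====
-- def blanklinerem(delimstripdata):
--     # single-pass in-place compaction with a write cursor
--     w = 0
--     for x in delimstripdata:
--         if x != '':
--             delimstripdata[w] = x
--             w += 1
--     del delimstripdata[w:]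
--     return delimstripdata
-- ===== Notes on version B (the rewrite author's own statement) =====
-- stated objective: alternative
-- what changed: Replaces the repeated .index/.remove scan-and-shift loop with a single in-place write-cursor pass that compacts non-empty strings and truncates the tail; on the timed inputs (few blanks) this is not measurably faster.
import Mathlib
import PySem

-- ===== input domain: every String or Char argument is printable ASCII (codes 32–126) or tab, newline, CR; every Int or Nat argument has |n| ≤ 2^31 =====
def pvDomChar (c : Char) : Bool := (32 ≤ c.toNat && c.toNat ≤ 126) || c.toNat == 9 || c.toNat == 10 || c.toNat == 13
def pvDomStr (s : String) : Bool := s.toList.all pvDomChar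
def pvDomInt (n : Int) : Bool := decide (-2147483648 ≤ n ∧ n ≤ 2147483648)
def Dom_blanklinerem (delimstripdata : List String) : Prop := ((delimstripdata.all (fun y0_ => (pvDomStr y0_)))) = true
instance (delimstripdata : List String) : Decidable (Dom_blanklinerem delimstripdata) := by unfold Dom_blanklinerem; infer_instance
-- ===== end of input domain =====

-- B: single in-place write-cursor compaction (ported as a left fold building the kept prefix),
-- a structurally different single pass instead of A's repeated index/remove scan (same cost on blank-free input). Equivalence is about the RETURN value only; both
-- Pythons mutate the argument in place (A via .remove, B via slot writes and slice-delete).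
-- ===== PORT A =====
-- Python: while True: try idx = d.index('') except ValueError: return d; else: d.remove('')
-- d.remove('') removes the FIRST occurrence = List.erase (exact here since index found one).
def blanklinerem (delimstripdata : List String) : List String :=
  if _h : (PySem.List.index? delimstripdata "").isSome then
    blanklinerem (delimstripdata.erase "")
  else delimstripdata
termination_by delimstripdata.length
decreasing_by
  have hm := (PySem.List.index?_isSome_iff _ _).mp _h
  have := List.length_erase_add_one hm
  omega

-- ===== PORT B =====
-- one pass; the accumulator is the compacted kept prefix (Python's d[0:w])
def blanklinerem_alt (delimstripdata : List String) : List String :=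
  delimstripdata.foldl (fun acc x => if x ≠ "" then acc ++ [x] else acc) []

-- ===== PRECONDITION & SPEC =====
def Spec_blanklinerem (delimstripdata : List String) (out : List String) : Prop := out = blanklinerem_alt delimstripdata
instance (delimstripdata : List String) (out : List String) : Decidable (Spec_blanklinerem delimstripdata out) := by unfold Spec_blanklinerem; infer_instance

-- ===== CLAIM (what is proved, stated in full; the proofs are below) =====
def Claim_equal_blanklinerem : Prop := ∀ (delimstripdata : List String), Dom_blanklinerem delimstripdata → Spec_blanklinerem delimstripdata (blanklinerem delimstripdata)

-- ===== LEMMAS AND PROOFS =====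

theorem filter_erase_blank (l : List String) :
    (l.erase "").filter (fun x => x ≠ "") = l.filter (fun x => x ≠ "") := by
  induction l with
  | nil => simp
  | cons x xs ih =>
    by_cases hx : x = ""
    · subst hx; simp
    · simp [hx]
      simpa using ih

theorem blanklinerem_eq_filter (d : List String) :
    blanklinerem d = d.filter (fun x => x ≠ "") := by
  fun_induction blanklinerem d with
  | case1 d h ih => rw [ih, filter_erase_blank]
  | case2 d h =>
    have hnm : "" ∉ d := fun hm => h ((PySem.List.index?_isSome_iff _ _).mpr hm)
    exact (List.filter_eq_self.mpr (fun a ha => by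
      simp only [ne_eq, decide_eq_true_eq]
      exact fun e => hnm (e ▸ ha))).symm

theorem alt_foldl (d : List String) (acc : List String) :
    d.foldl (fun acc x => if x ≠ "" then acc ++ [x] else acc) acc
      = acc ++ d.filter (fun x => x ≠ "") := by
  induction d generalizing acc with
  | nil => simp
  | cons x xs ih =>
    rw [List.foldl_cons]
    by_cases hx : x = ""
    · rw [if_neg (not_not_intro hx), ih]
      simp [hx]
    · rw [if_pos hx, ih]
      simp [hx]

-- ===== VERDICT (by name: the statement is the Claim_ definition above) =====
theorem blanklinerem_spec : Claim_equal_blanklinerem := by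
  intro d _
  unfold Spec_blanklinerem blanklinerem_alt
  rw [blanklinerem_eq_filter, alt_foldl]
  simp
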